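-- pv_equiv track=rewrite | github.com/pypi-data/pypi-mirror-400 | packages/orka-reasoning/orka_reasoning-0.9.14-py3-none-any.whl/orka/tui/message_renderer.py | _render_yaml
-- ===== SOURCE A (Python) =====
-- def _render_yaml(content: str) -> str:
--     """Render YAML content with basic formatting."""
--     # Add basic indentation coloring
--     lines = content.split('\n')
--     formatted_lines = []
--
--     for line in lines:
--         if ':' in line:
--             key, value = line.split(':', 1)
--             formatted_lines.append(f"[cyan]{key}:[/cyan]{value}")
--         else:
--             formatted_lines.append(line)
--
--     return '\n'.join(formatted_lines)
-- ===== SOURCE B (Python) =====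
-- def _render_yaml(content: str) -> str:
--     """Render YAML content with basic formatting (single streaming pass)."""
--     out = []
--     buf = []          # chars of the current line before any ':'
--     seen = False      # a ':' was already handled on the current line
--     for ch in content:
--         if ch == '\n':
--             if not seen:
--                 out.extend(buf)
--             out.append('\n')
--             buf = []
--             seen = False
--         elif seen:
--             out.append(ch)
--         elif ch == ':':
--             out.append('[cyan]')
--             out.extend(buf)
--             out.append(':[/cyan]')
--             buf = []
--             seen = True
--         else:
--             buf.append(ch)
--     if not seen:
--         out.extend(buf)
--     return ''.join(out)
-- ===== Notes on version B (the rewrite author's own statement) =====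
-- stated objective: alternative
-- what changed: Replaced A's three-phase pipeline (split content into lines, re-split each line at the first colon, join the formatted lines) by a single streaming state machine over the characters that buffers the pre-colon prefix of the current line and emits the markup in one pass.
import Mathlib
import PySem

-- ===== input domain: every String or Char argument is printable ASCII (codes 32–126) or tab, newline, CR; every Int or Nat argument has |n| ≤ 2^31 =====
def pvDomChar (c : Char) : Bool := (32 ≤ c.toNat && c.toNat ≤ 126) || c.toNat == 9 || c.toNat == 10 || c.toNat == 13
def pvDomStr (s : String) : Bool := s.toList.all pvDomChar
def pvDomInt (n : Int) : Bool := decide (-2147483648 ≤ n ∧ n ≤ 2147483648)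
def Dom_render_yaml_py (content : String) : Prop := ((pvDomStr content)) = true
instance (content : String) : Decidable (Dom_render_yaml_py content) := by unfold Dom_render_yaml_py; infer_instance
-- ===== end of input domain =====

-- B replaces A's split-into-lines / split-each-line-at-first-colon / join pipeline by a
-- single streaming character pass (a state machine buffering the pre-colon prefix of the
-- current line); objective: alternative structure, same asymptotic cost.


-- ===== PORT A =====
-- literal port of A on the List Char side (PySem.Str.* are thin wrappers over PySem.Chars.*):
-- lines = content.split('\n'); loop appending each formatted line; '\n'.join(...).
-- "key, value = line.split(':', 1)" is ported as elements 0 and 1 of the split (under the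
-- ':' in line guard the split has exactly two parts, so the getD defaults are unreachable).
def render_yaml_py (content : String) : String :=
  let lines := PySem.Chars.splitOn content.toList ['\n']
  let formatted := lines.foldl (fun acc line =>
    acc ++ [if PySem.Chars.isIn [':'] line then
              let parts := PySem.Chars.splitOnMax line [':'] 1
              "[cyan]".toList ++ parts.getD 0 [] ++ ":[/cyan]".toList ++ parts.getD 1 []
            else line]) []
  String.ofList (PySem.Chars.join ['\n'] formatted)

-- ===== PORT B =====
-- port of Source B's streaming loop: buf = current line's chars before any ':',
-- seen = a ':' was already handled on the current line
def goB : List Char → List Char → Bool → List Char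
  | [], buf, seen => if seen then [] else buf
  | c :: rest, buf, seen =>
    if c = '\n' then
      (if seen then [] else buf) ++ '\n' :: goB rest [] false
    else if seen then
      c :: goB rest buf true
    else if c = ':' then
      "[cyan]".toList ++ buf ++ ":[/cyan]".toList ++ goB rest [] true
    else
      goB rest (buf ++ [c]) false

def render_yaml_py_alt (content : String) : String :=
  String.ofList (goB content.toList [] false)

-- ===== PRECONDITION & SPEC =====
def Spec_render_yaml_py (content : String) (out : String) : Prop := out = render_yaml_py_alt content
instance (content : String) (out : String) : Decidable (Spec_render_yaml_py content out) := by unfold Spec_render_yaml_py; infer_instance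

-- ===== CLAIM (what is proved, stated in full; the proofs are below) =====
def Claim_equal_render_yaml_py : Prop := ∀ (content : String), Dom_render_yaml_py content → Spec_render_yaml_py content (render_yaml_py content)

-- ===== LEMMAS AND PROOFS =====
-- first-split: Python l.split(d,1) shape
def splitOA (d : Char) : List Char → Option (List Char × List Char)
  | [] => none
  | c :: rest => if c = d then some ([], rest) else (splitOA d rest).map (fun p => (c :: p.1, p.2))

def splitCh (d : Char) : List Char → List (List Char)
  | [] => [[]]
  | c :: rest => if c = d then [] :: splitCh d rest else (splitCh d rest).modifyHead (c :: ·)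

theorem splitCh_ne_nil (d : Char) (l : List Char) : splitCh d l ≠ [] := by
  induction l with
  | nil => simp [splitCh]
  | cons c rest ih =>
    simp only [splitCh]
    split
    · simp
    · intro h; exact ih (List.modifyHead_eq_nil_iff.mp h)

theorem splitOA_none_iff (d : Char) (l : List Char) : splitOA d l = none ↔ d ∉ l := by
  induction l with
  | nil => simp [splitOA]
  | cons c rest ih =>
    simp only [splitOA]
    split
    · rename_i h; subst h; simp
    · rename_i h
      simp only [Option.map_eq_none_iff, ih, List.mem_cons]
      constructor
      · intro hn hmem
        rcases hmem with hh | hh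
        · exact h hh.symm
        · exact hn hh
      · intro hn hmem; exact hn (Or.inr hmem)

theorem headI_cons_tail_of_ne_nil {α : Type} [Inhabited α] (l : List α) (h : l ≠ []) :
    l.headI :: l.tail = l := by
  cases l with
  | nil => exact absurd rfl h
  | cons a t => rfl

theorem splitOn_go_eq (d : Char) :
    ∀ (fuel : Nat) (l cur : List Char) (acc : List (List Char)), l.length < fuel →
      PySem.Chars.splitOn.go [d] fuel l cur acc =
        acc.reverse ++ (cur.reverse ++ (splitCh d l).headI) :: (splitCh d l).tail := by
  intro fuel
  induction fuel with
  | zero => intro l cur acc h; omega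
  | succ fuel ih =>
    intro l cur acc h
    cases l with
    | nil => simp [PySem.Chars.splitOn.go, splitCh]
    | cons c rest =>
      simp only [PySem.Chars.splitOn.go]
      by_cases hc : c = d
      · subst hc
        simp only [List.isPrefixOf, beq_self_eq_true, Bool.true_and, if_pos, List.length_cons,
          List.length_nil, Nat.zero_add, List.drop_succ_cons, List.drop_zero]
        rw [ih rest [] (cur.reverse :: acc) (by simp at h; omega)]
        simp [splitCh, headI_cons_tail_of_ne_nil _ (splitCh_ne_nil c rest)]
      · have hpre : [d].isPrefixOf (c :: rest) = false := by
          simp [List.isPrefixOf]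
          exact fun hh => (hc hh.symm).elim
        rw [hpre]
        simp only [Bool.false_eq_true, if_false]
        rw [ih rest (c :: cur) acc (by simp at h; omega)]
        have hne := splitCh_ne_nil d rest
        cases hsp : splitCh d rest with
        | nil => exact absurd hsp hne
        | cons hhd ttl => simp [splitCh, hc, hsp, List.modifyHead]

theorem splitOn_eq (d : Char) (l : List Char) :
    PySem.Chars.splitOn l [d] = splitCh d l := by
  unfold PySem.Chars.splitOn
  rw [splitOn_go_eq d (l.length + 1) l [] [] (by omega)]
  have hne := splitCh_ne_nil d l
  cases hsp : splitCh d l with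
  | nil => exact absurd hsp hne
  | cons h t => simp

theorem splitOnMax_go_zero (d : Char) (fuel : Nat) (l cur : List Char) (acc : List (List Char))
    (h : 0 < fuel) :
    PySem.Chars.splitOnMax.go [d] fuel 0 l cur acc = acc.reverse ++ [cur.reverse ++ l] := by
  cases fuel with
  | zero => omega
  | succ fuel =>
    cases l with
    | nil => simp [PySem.Chars.splitOnMax.go]
    | cons c rest => simp [PySem.Chars.splitOnMax.go]

theorem splitOnMax_go_one (d : Char) :
    ∀ (fuel : Nat) (l cur : List Char) (acc : List (List Char)), l.length < fuel →
      PySem.Chars.splitOnMax.go [d] fuel 1 l cur acc =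
        acc.reverse ++ (match splitOA d l with
          | none => [cur.reverse ++ l]
          | some (a, b) => [cur.reverse ++ a, b]) := by
  intro fuel
  induction fuel with
  | zero => intro l cur acc h; omega
  | succ fuel ih =>
    intro l cur acc h
    cases l with
    | nil => simp [PySem.Chars.splitOnMax.go, splitOA]
    | cons c rest =>
      simp only [PySem.Chars.splitOnMax.go]
      by_cases hc : c = d
      · subst hc
        simp only [List.isPrefixOf, beq_self_eq_true, Bool.true_and, if_pos, List.length_cons,
          List.length_nil, Nat.zero_add, List.drop_succ_cons, List.drop_zero]
        rw [if_neg (by omega : ¬ (1 : Nat) = 0)]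
        rw [splitOnMax_go_zero _ fuel rest [] (cur.reverse :: acc) (by simp at h; omega)]
        simp [splitOA]
      · rw [if_neg (by omega : ¬ (1 : Nat) = 0)]
        have hpre : [d].isPrefixOf (c :: rest) = false := by
          simp [List.isPrefixOf]
          exact fun hh => (hc hh.symm).elim
        rw [hpre]
        simp only [Bool.false_eq_true, if_false]
        rw [ih rest (c :: cur) acc (by simp at h; omega)]
        simp only [splitOA, if_neg hc]
        cases hsp : splitOA d rest with
        | none => simp
        | some p => cases p with | mk a b => simp

theorem splitOnMax_eq (d : Char) (l : List Char) :
    PySem.Chars.splitOnMax l [d] 1 =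
      (match splitOA d l with
        | none => [l]
        | some (a, b) => [a, b]) := by
  unfold PySem.Chars.splitOnMax
  rw [if_neg (by omega : ¬ (1 : Int) < 0)]
  rw [show Int.toNat 1 = 1 from rfl]
  rw [splitOnMax_go_one d (l.length + 1) l [] [] (by omega)]
  cases hsp : splitOA d l with
  | none => simp
  | some p => cases p with | mk a b => simp

-- per-line output of A, and A's whole result S, phrased via the structural splitters
def lineOut (line : List Char) : List Char :=
  match splitOA ':' line with
  | none => line
  | some (a, b) => "[cyan]".toList ++ a ++ ":[/cyan]".toList ++ b

def S (cs : List Char) : List Char :=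
  PySem.Chars.join ['\n'] ((splitCh '\n' cs).map lineOut)

theorem isIn_singleton (d : Char) (l : List Char) :
    PySem.Chars.isIn [d] l = true ↔ d ∈ l := by
  rw [PySem.Chars.isIn_iff_infix]
  exact List.singleton_infix_iff d l

theorem lineOut_eq_branch (line : List Char) :
    (if PySem.Chars.isIn [':'] line then
       let parts := PySem.Chars.splitOnMax line [':'] 1
       "[cyan]".toList ++ parts.getD 0 [] ++ ":[/cyan]".toList ++ parts.getD 1 []
     else line) = lineOut line := by
  cases hsp : splitOA ':' line with
  | none =>
    have hni : ':' ∉ line := (splitOA_none_iff ':' line).mp hsp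
    rw [if_neg (by simp [isIn_singleton]; exact hni)]
    simp [lineOut, hsp]
  | some p =>
    cases p with
    | mk a b =>
      have hmem : ':' ∈ line := by
        by_contra hn
        rw [(splitOA_none_iff ':' line).mpr hn] at hsp
        exact (Option.some_ne_none _ hsp.symm)
      rw [if_pos ((isIn_singleton ':' line).mpr hmem)]
      simp [lineOut, hsp, splitOnMax_eq]

theorem renderA_eq_S (content : String) :
    render_yaml_py content = String.ofList (S content.toList) := by
  unfold render_yaml_py S
  simp only [PySem.List.foldl_append_singleton_eq_map, List.nil_append, splitOn_eq]
  congr 1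
  congr 1
  apply List.map_congr_left
  intro line _
  exact lineOut_eq_branch line

theorem splitOA_append (d : Char) (buf cs : List Char) (h : d ∉ buf) :
    splitOA d (buf ++ cs) = (splitOA d cs).map (fun p => (buf ++ p.1, p.2)) := by
  induction buf with
  | nil => simp [Option.map_id']
  | cons c rest ih =>
    simp only [List.cons_append, splitOA]
    rw [if_neg (by intro hh; exact h (by simp [hh]))]
    rw [ih (by intro hh; exact h (by simp [hh]))]
    cases splitOA d cs with
    | none => simp
    | some p => cases p with | mk a b => simp

theorem splitOA_append_self (d : Char) (buf rest : List Char) (h : d ∉ buf) :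
    splitOA d (buf ++ d :: rest) = some (buf, rest) := by
  rw [splitOA_append d buf _ h]
  simp [splitOA]

theorem splitCh_eq_splitOA (d : Char) (l : List Char) :
    splitCh d l = (match splitOA d l with
      | none => [l]
      | some (a, b) => a :: splitCh d b) := by
  induction l with
  | nil => simp [splitCh, splitOA]
  | cons c rest ih =>
    simp only [splitCh, splitOA]
    by_cases hc : c = d
    · simp [hc]
    · rw [if_neg hc, if_neg hc, ih]
      cases splitOA d rest with
      | none => simp [List.modifyHead]
      | some p => cases p with | mk a b => simp [List.modifyHead]

theorem splitCh_no_sep (d : Char) (l : List Char) (h : d ∉ l) : splitCh d l = [l] := by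
  rw [splitCh_eq_splitOA, (splitOA_none_iff d l).mpr h]

theorem splitCh_append_sep (d : Char) (buf rest : List Char) (h : d ∉ buf) :
    splitCh d (buf ++ d :: rest) = buf :: splitCh d rest := by
  rw [splitCh_eq_splitOA, splitOA_append_self d buf rest h]

theorem lineOut_no_colon (line : List Char) (h : ':' ∉ line) : lineOut line = line := by
  simp [lineOut, (splitOA_none_iff ':' line).mpr h]

theorem splitOA_some_length (d : Char) :
    ∀ (l a b : List Char), splitOA d l = some (a, b) → b.length < l.length := by
  intro l
  induction l with
  | nil => intro a b h; simp [splitOA] at h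
  | cons c rest ih =>
    intro a b h
    simp only [splitOA] at h
    by_cases hc : c = d
    · rw [if_pos hc] at h
      simp at h
      simp [← h.2]
    · rw [if_neg hc] at h
      cases hsp : splitOA d rest with
      | none => rw [hsp] at h; simp at h
      | some p =>
        cases p with
        | mk a' b' =>
          rw [hsp] at h
          simp at h
          have := ih a' b' hsp
          simp [← h.2]
          omega

theorem goB_true (cs : List Char) : ∀ (buf : List Char),
    goB cs buf true = (match splitOA '\n' cs with
      | none => cs
      | some (a, b) => a ++ '\n' :: goB b [] false) := by
  induction cs with
  | nil => intro buf; simp [goB, splitOA]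
  | cons c rest ih =>
    intro buf
    by_cases hc : c = '\n'
    · subst hc
      simp [goB, splitOA]
    · simp only [goB, if_neg hc, splitOA]
      rw [ih buf]
      cases splitOA '\n' rest with
      | none => simp
      | some p => cases p with | mk a b => simp

theorem goB_false : ∀ (n : Nat) (cs buf : List Char), cs.length ≤ n →
    ':' ∉ buf → '\n' ∉ buf → goB cs buf false = S (buf ++ cs) := by
  intro n
  induction n with
  | zero =>
    intro cs buf hlen hc hn
    have : cs = [] := List.eq_nil_of_length_eq_zero (by omega)
    subst this
    simp only [goB, if_neg (by simp : ¬ false = true), List.append_nil, S]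
    rw [splitCh_no_sep '\n' buf hn]
    simp [PySem.Chars.join_singleton, lineOut_no_colon buf hc]
  | succ n ih =>
    intro cs buf hlen hc hn
    cases cs with
    | nil =>
      simp only [goB, if_neg (by simp : ¬ false = true), List.append_nil, S]
      rw [splitCh_no_sep '\n' buf hn]
      simp [PySem.Chars.join_singleton, lineOut_no_colon buf hc]
    | cons c rest =>
      by_cases hcn : c = '\n'
      · subst hcn
        simp only [goB, if_neg (by simp : ¬ false = true)]
        rw [ih rest [] (by simp at hlen; omega) (by simp) (by simp)]
        simp only [List.nil_append, S]
        rw [splitCh_append_sep '\n' buf rest hn]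
        simp only [List.map_cons]
        have hne := splitCh_ne_nil '\n' rest
        cases hsp : splitCh '\n' rest with
        | nil => exact absurd hsp hne
        | cons h t =>
          simp only [List.map_cons]
          rw [PySem.Chars.join_cons_cons]
          rw [lineOut_no_colon buf hc]
          simp
      · by_cases hcc : c = ':'
        · subst hcc
          simp only [goB, if_neg hcn, if_neg (by simp : ¬ false = true)]
          rw [goB_true rest []]
          have hn' : '\n' ∉ buf ++ [':'] := by
            simp [hn]
          cases hsp : splitOA '\n' rest with
          | none =>
            have hrest : '\n' ∉ rest := (splitOA_none_iff '\n' rest).mp hsp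
            have hfull : '\n' ∉ buf ++ ':' :: rest := by simp [hn, hrest]
            simp only [S]
            rw [splitCh_no_sep '\n' _ hfull]
            simp only [List.map_cons, List.map_nil, PySem.Chars.join_singleton]
            rw [show lineOut (buf ++ ':' :: rest) =
                  "[cyan]".toList ++ buf ++ ":[/cyan]".toList ++ rest from by
              simp [lineOut, splitOA_append_self ':' buf rest hc]]
            simp
          | some p =>
            cases p with
            | mk a b =>
              simp only [if_true]
              rw [ih b [] (by
                  have := splitOA_some_length '\n' rest a b hsp
                  simp at hlen; omega) (by simp) (by simp)]
              simp only [List.nil_append, S]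
              have : splitCh '\n' (buf ++ ':' :: rest) = (buf ++ ':' :: a) :: splitCh '\n' b := by
                rw [splitCh_eq_splitOA]
                rw [show buf ++ ':' :: rest = (buf ++ [':']) ++ rest from by simp]
                rw [splitOA_append '\n' (buf ++ [':']) rest (by simp [hn]), hsp]
                simp
              rw [this]
              simp only [List.map_cons]
              have hne := splitCh_ne_nil '\n' b
              cases hspb : splitCh '\n' b with
              | nil => exact absurd hspb hne
              | cons h t =>
                simp only [List.map_cons]
                rw [PySem.Chars.join_cons_cons]
                rw [show lineOut (buf ++ ':' :: a) =
                      "[cyan]".toList ++ buf ++ ":[/cyan]".toList ++ a from by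
                  simp [lineOut, splitOA_append_self ':' buf a hc]]
                simp
        · simp only [goB, if_neg hcn, if_neg (by simp : ¬ false = true), if_neg hcc]
          rw [ih rest (buf ++ [c]) (by simp at hlen; omega)
            (by simp [hc]; exact fun hh => hcc hh.symm)
            (by simp [hn]; exact fun hh => hcn hh.symm)]
          simp

theorem renderA_eq_renderB (content : String) : render_yaml_py content = render_yaml_py_alt content := by
  rw [renderA_eq_S]
  unfold render_yaml_py_alt
  rw [goB_false content.toList.length content.toList [] (le_refl _) (by simp) (by simp)]
  simp

-- ===== VERDICT (by name: the statement is the Claim_ definition above) =====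
theorem render_yaml_py_spec : Claim_equal_render_yaml_py := by
  intro content _
  unfold Spec_render_yaml_py
  exact renderA_eq_renderB content
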